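-- pv_equiv track=rewrite | github.com/masud13222/auto_up | upload/utils/web_scrape_html.py | truncate_markdown_for_llm
-- ===== SOURCE A (Python) =====
-- _MARKDOWN_DISCARD_FROM_LINE = (
--     "### How to Download?",
--     "## You May Also Like",
-- )
--
-- def truncate_markdown_for_llm(md: str) -> str:
--     """Remove a known heading and everything after it (comments, related posts, how-to filler)."""
--     lines = md.split("\n")
--     cut = len(lines)
--     for trigger in _MARKDOWN_DISCARD_FROM_LINE:
--         for i, line in enumerate(lines):
--             if line.strip() == trigger:
--                 cut = min(cut, i)
--                 break
--     if cut < len(lines):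
--         return "\n".join(lines[:cut]).rstrip()
--     return md
-- ===== SOURCE B (Python) =====
-- _MARKDOWN_DISCARD_FROM_LINE = (
--     "### How to Download?",
--     "## You May Also Like",
-- )
--
-- def truncate_markdown_for_llm(md: str) -> str:
--     """Single pass: keep lines until a discard heading appears, then join the kept prefix."""
--     kept = []
--     for line in md.split("\n"):
--         if line.strip() in _MARKDOWN_DISCARD_FROM_LINE:
--             return "\n".join(kept).rstrip()
--         kept.append(line)
--     return md
-- ===== Notes on version B (the rewrite author's own statement) =====
-- stated objective: simpler
-- what changed: Replaces the per-trigger scan with index/min/cut bookkeeping by one accumulator pass that keeps lines until the first discard heading and joins the kept prefix.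
import Mathlib
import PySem

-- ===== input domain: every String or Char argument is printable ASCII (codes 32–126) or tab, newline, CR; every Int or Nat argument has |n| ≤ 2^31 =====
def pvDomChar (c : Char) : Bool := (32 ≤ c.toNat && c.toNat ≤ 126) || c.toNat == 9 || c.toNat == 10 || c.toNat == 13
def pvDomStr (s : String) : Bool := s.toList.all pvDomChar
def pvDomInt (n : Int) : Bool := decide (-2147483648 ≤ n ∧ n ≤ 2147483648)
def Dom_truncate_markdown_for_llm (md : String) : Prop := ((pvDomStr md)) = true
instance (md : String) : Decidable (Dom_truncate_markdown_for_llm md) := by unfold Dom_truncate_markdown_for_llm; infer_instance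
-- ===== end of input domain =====

-- B replaces A's per-trigger scans with cut/min bookkeeping by one accumulator pass (simpler).

-- ===== PORT A =====
def pvTriggers : List String := ["### How to Download?", "## You May Also Like"]

-- inner loop of A: first line (from index i) whose strip equals trigger lowers cut, then break
def pvFindA (trig : String) (ls : List String) (i cut : Nat) : Nat :=
  match ls with
  | [] => cut
  | l :: rest =>
      if PySem.Str.strip l == trig then min cut i
      else pvFindA trig rest (i + 1) cut

def truncate_markdown_for_llm (md : String) : String :=
  let lines := (PySem.Str.split? md "\n").getD []
  let cut := pvTriggers.foldl (fun c t => pvFindA t lines 0 c) lines.length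
  if cut < lines.length then
    PySem.Str.rstrip (PySem.Str.join "\n" (lines.take cut))
  else md

-- ===== PORT B =====
-- B's loop: accumulate kept lines; on the first discard heading return the kept prefix
def pvScanB (kept : List String) (ls : List String) : Option (List String) :=
  match ls with
  | [] => none
  | l :: rest =>
      if pvTriggers.contains (PySem.Str.strip l) then some kept
      else pvScanB (kept ++ [l]) rest

def truncate_markdown_for_llm_alt (md : String) : String :=
  match pvScanB [] ((PySem.Str.split? md "\n").getD []) with
  | some kept => PySem.Str.rstrip (PySem.Str.join "\n" kept)
  | none => md

-- ===== PRECONDITION & SPEC =====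
def Spec_truncate_markdown_for_llm (md : String) (out : String) : Prop := out = truncate_markdown_for_llm_alt md
instance (md : String) (out : String) : Decidable (Spec_truncate_markdown_for_llm md out) := by unfold Spec_truncate_markdown_for_llm; infer_instance

-- ===== CLAIM (what is proved, stated in full; the proofs are below) =====
def Claim_equal_truncate_markdown_for_llm : Prop := ∀ (md : String), Dom_truncate_markdown_for_llm md → Spec_truncate_markdown_for_llm md (truncate_markdown_for_llm md)

-- ===== LEMMAS AND PROOFS =====

-- first (relative) index of a line whose strip equals t
def pvIdx (t : String) : List String → Option Nat
  | [] => none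
  | l :: rest => if PySem.Str.strip l == t then some 0 else (pvIdx t rest).map (· + 1)

-- first (relative) index of a line whose strip is a trigger
def pvIdxP : List String → Option Nat
  | [] => none
  | l :: rest => if pvTriggers.contains (PySem.Str.strip l) then some 0 else (pvIdxP rest).map (· + 1)

def pvOptMin : Option Nat → Option Nat → Option Nat
  | none, b => b
  | some a, none => some a
  | some a, some b => some (min a b)

theorem pvFindA_eq (t : String) (ls : List String) (i cut : Nat) :
    pvFindA t ls i cut = match pvIdx t ls with
      | some j => min cut (i + j)
      | none => cut := by
  induction ls generalizing i with
  | nil => simp [pvFindA, pvIdx]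
  | cons l rest ih =>
      simp only [pvFindA, pvIdx]
      by_cases h : PySem.Str.strip l == t
      · simp [h]
      · simp only [h, if_neg, ih]
        cases pvIdx t rest with
        | none => simp
        | some j => simp [Nat.add_assoc, Nat.add_comm 1 j]

theorem pvIdx_lt (t : String) (ls : List String) (j : Nat) (h : pvIdx t ls = some j) :
    j < ls.length := by
  induction ls generalizing j with
  | nil => simp [pvIdx] at h
  | cons l rest ih =>
      simp only [pvIdx] at h
      split at h
      · cases h; simp
      · cases hr : pvIdx t rest with
        | none => simp [hr] at h
        | some k =>
            simp [hr] at h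
            subst h
            have := ih k hr
            simpa [List.length_cons] using Nat.succ_lt_succ this

theorem pvOptMin_zero_left (x : Option Nat) : pvOptMin (some 0) x = some 0 := by
  cases x <;> simp [pvOptMin]

theorem pvOptMin_zero_right (x : Option Nat) : pvOptMin x (some 0) = some 0 := by
  cases x <;> simp [pvOptMin]

theorem pvOptMin_map_succ (a b : Option Nat) :
    pvOptMin (a.map (· + 1)) (b.map (· + 1)) = (pvOptMin a b).map (· + 1) := by
  cases a <;> cases b <;> simp [pvOptMin] <;> omega

theorem pvIdxP_eq (ls : List String) :
    pvIdxP ls = pvOptMin (pvIdx "### How to Download?" ls) (pvIdx "## You May Also Like" ls) := by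
  induction ls with
  | nil => simp [pvIdxP, pvIdx, pvOptMin]
  | cons l rest ih =>
      simp only [pvIdxP, pvIdx]
      by_cases h1 : PySem.Str.strip l = "### How to Download?"
      · have hm : PySem.Str.strip l ∈ pvTriggers := by simp [pvTriggers, h1]
        simp [hm, h1, pvTriggers, pvOptMin_zero_left]
      · by_cases h2 : PySem.Str.strip l = "## You May Also Like"
        · have hm : PySem.Str.strip l ∈ pvTriggers := by simp [pvTriggers, h2]
          simp [hm, h1, h2, pvTriggers, pvOptMin_zero_right]
        · have hm : PySem.Str.strip l ∉ pvTriggers := by simp [pvTriggers, h1, h2]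
          simp [hm, h1, h2, ih]
          exact (pvOptMin_map_succ _ _).symm

theorem pvScanB_eq (ls : List String) (kept : List String) :
    pvScanB kept ls = match pvIdxP ls with
      | some j => some (kept ++ ls.take j)
      | none => none := by
  induction ls generalizing kept with
  | nil => simp [pvScanB, pvIdxP]
  | cons l rest ih =>
      simp only [pvScanB, pvIdxP]
      by_cases h : PySem.Str.strip l ∈ pvTriggers
      · simp [h]
      · simp only [h, if_neg, not_false_iff, ih]
        simp
        cases pvIdxP rest with
        | none => simp [h]
        | some j => simp [h, List.take_succ_cons]

-- ===== VERDICT (by name: the statement is the Claim_ definition above) =====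
theorem truncate_markdown_for_llm_spec : Claim_equal_truncate_markdown_for_llm := by
  intro md _
  unfold Spec_truncate_markdown_for_llm truncate_markdown_for_llm truncate_markdown_for_llm_alt
  simp only [pvTriggers, List.foldl_cons, List.foldl_nil]
  set lines := (PySem.Str.split? md "\n").getD [] with hlines
  rw [pvFindA_eq, pvFindA_eq, pvScanB_eq, pvIdxP_eq]
  cases ha : pvIdx "### How to Download?" lines with
  | none =>
      cases hb : pvIdx "## You May Also Like" lines with
      | none => simp [pvOptMin]
      | some b =>
          have hblt := pvIdx_lt _ _ _ hb
          simp [pvOptMin, Nat.min_eq_right (Nat.le_of_lt hblt), hblt]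
  | some a =>
      have halt := pvIdx_lt _ _ _ ha
      cases hb : pvIdx "## You May Also Like" lines with
      | none =>
          simp [pvOptMin, Nat.min_eq_right (Nat.le_of_lt halt), halt]
      | some b =>
          have hblt := pvIdx_lt _ _ _ hb
          have h1 : min lines.length a = a := Nat.min_eq_right (Nat.le_of_lt halt)
          have h2 : min a b < lines.length := lt_of_le_of_lt (Nat.min_le_right a b) hblt
          simp [pvOptMin, h1, h2]
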